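-- pv_equiv track=rewrite | github.com/VargaScript/fullstack_ai_engineer | 1_programming_and_cs_foundations/python/learning/2_string_operations.py | custom_replace
-- ===== SOURCE A (Python) =====
-- def custom_replace(text, target, replacement):
--     result = ""
--     i = 0
--
--     while i < len(text):
--         if text[i:i+len(target)] == target:
--             result += replacement
--             i += len(target)
--         else:
--             result += text[i]
--             i += 1
--
--     return result
-- ===== SOURCE B (Python) =====
-- def custom_replace(text, target, replacement):
--     return text.replace(target, replacement)
-- ===== Notes on version B (the rewrite author's own statement) =====
-- stated objective: faster
-- what changed: Replaced the per-character Python while-loop with repeated slice comparison and string concatenation by a single call to str.replace, which scans the text once in C.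
-- outside the precondition, e.g. on custom_replace('', '', 'x'): A returns '', B returns 'x'; on custom_replace('a', '', 'x'): A does not finish within the time limit, B returns 'xax'
import Mathlib
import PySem

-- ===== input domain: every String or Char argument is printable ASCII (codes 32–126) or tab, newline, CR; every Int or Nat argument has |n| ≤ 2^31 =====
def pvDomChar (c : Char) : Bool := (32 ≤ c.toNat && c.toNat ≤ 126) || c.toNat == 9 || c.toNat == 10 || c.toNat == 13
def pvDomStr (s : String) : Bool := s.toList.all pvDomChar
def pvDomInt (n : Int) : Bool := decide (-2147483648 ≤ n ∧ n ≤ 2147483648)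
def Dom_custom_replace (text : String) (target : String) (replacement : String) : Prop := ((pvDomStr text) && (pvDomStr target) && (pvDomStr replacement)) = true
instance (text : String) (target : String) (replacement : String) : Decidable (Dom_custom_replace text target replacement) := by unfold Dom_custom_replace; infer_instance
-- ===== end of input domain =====

-- B replaces A's per-character while-loop (slice comparison + string concatenation) by a single
-- str.replace call; Pre_ excludes the empty target, on which A loops forever (or, on empty text,
-- returns "" only because the loop never runs).


-- ===== PORT A =====
-- A's while-loop: index i, growing result; text[i:i+len(target)] is a slice, text[i] a getD (i < len
-- is guaranteed by the loop guard).  Fuel text.length + 1 covers every terminating run of A (i grows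
-- by at least 1 per iteration when target ≠ ""; the target = "" runs A does not finish are outside Pre_).
def custom_replace_go (text target replacement : List Char) : Nat → Nat → List Char → List Char
  | 0, _, result => result
  | fuel + 1, i, result =>
    if i < text.length then
      if PySem.List.slice text (some (i : Int)) (some ((i : Int) + (target.length : Int))) = target then
        custom_replace_go text target replacement fuel (i + target.length) (result ++ replacement)
      else
        custom_replace_go text target replacement fuel (i + 1) (result ++ [text.getD i ' '])
    else result

def custom_replace (text : String) (target : String) (replacement : String) : String :=
  String.ofList (custom_replace_go text.toList target.toList replacement.toList (text.toList.length + 1) 0 [])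

-- ===== PORT B =====
def custom_replace_alt (text : String) (target : String) (replacement : String) : String :=
  PySem.Str.replace text target replacement

-- ===== PRECONDITION & SPEC =====
-- Pre_ excludes the empty target: there A's loop never advances (it diverges on nonempty text, and on
-- empty text returns "" only because the loop body never runs, while str.replace inserts replacement).
def Pre_custom_replace (text : String) (target : String) (replacement : String) : Prop :=
  target ≠ ""
instance (text : String) (target : String) (replacement : String) : Decidable (Pre_custom_replace text target replacement) := by unfold Pre_custom_replace; infer_instance

def pvWitness_custom_replace : String × String × String := ("abcab", "ab", "x")

def Spec_custom_replace (text : String) (target : String) (replacement : String) (out : String) : Prop := out = custom_replace_alt text target replacement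
instance (text : String) (target : String) (replacement : String) (out : String) : Decidable (Spec_custom_replace text target replacement out) := by unfold Spec_custom_replace; infer_instance

-- ===== CLAIM (what is proved, stated in full; the proofs are below) =====
def Claim_equal_custom_replace : Prop := ∀ (text : String) (target : String) (replacement : String), Dom_custom_replace text target replacement → Pre_custom_replace text target replacement → Spec_custom_replace text target replacement (custom_replace text target replacement)

-- ===== LEMMAS AND PROOFS =====

-- PySem.Chars.replace.go carries its accumulator reversed; pull it out front.
theorem replace_go_acc (old new : List Char) :
    ∀ (fuel : Nat) (l acc : List Char),
      PySem.Chars.replace.go old new fuel l acc =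
        acc.reverse ++ PySem.Chars.replace.go old new fuel l [] := by
  intro fuel
  induction fuel with
  | zero => intro l acc; simp [PySem.Chars.replace.go]
  | succ fuel ih =>
    intro l acc
    cases l with
    | nil => simp [PySem.Chars.replace.go]
    | cons c t =>
      simp only [PySem.Chars.replace.go]
      split
      · rw [ih _ (new.reverse ++ acc), ih _ (new.reverse ++ [])]
        simp
      · rw [ih _ (c :: acc), ih _ (c :: [])]
        simp

-- Main loop correspondence: A's index loop equals PySem's list-structural replace loop,
-- for any two sufficient fuels (target nonempty).
theorem custom_replace_go_eq (text target replacement : List Char) (hne : target ≠ []) :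
    ∀ (fuelA : Nat) (i : Nat) (result : List Char) (fuelB : Nat),
      text.length - i ≤ fuelA → (text.drop i).length ≤ fuelB →
      custom_replace_go text target replacement fuelA i result =
        result ++ PySem.Chars.replace.go target replacement fuelB (text.drop i) [] := by
  have ht : 0 < target.length := List.length_pos_iff.mpr hne
  intro fuelA
  induction fuelA with
  | zero =>
    intro i result fuelB hA hB
    have hi : text.length ≤ i := by omega
    have hdrop : text.drop i = [] := List.drop_eq_nil_of_le hi
    cases fuelB <;> simp [custom_replace_go, hdrop, PySem.Chars.replace.go]
  | succ fuelA ih =>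
    intro i result fuelB hA hB
    by_cases hi : i < text.length
    · have hdrop : text.drop i = text[i] :: text.drop (i + 1) :=
        List.drop_eq_getElem_cons hi
      have hlen : (text.drop i).length = text.length - i := List.length_drop ..
      obtain ⟨fuelB, rfl⟩ : ∃ k, fuelB = k + 1 := by
        cases fuelB with
        | zero => exfalso; rw [hlen] at hB; omega
        | succ k => exact ⟨k, rfl⟩
      have hslice : PySem.List.slice text (some (i : Int)) (some ((i : Int) + (target.length : Int)))
          = (text.drop i).take target.length := PySem.List.slice_natCast_add ..
      simp only [custom_replace_go, if_pos hi, hslice]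
      by_cases hpre : target <+: text.drop i
      · have htake : (text.drop i).take target.length = target :=
          (List.prefix_iff_eq_take.mp hpre).symm
        have hpb : target.isPrefixOf (text[i] :: text.drop (i + 1)) = true := by
          rw [← hdrop]; exact List.isPrefixOf_iff_prefix.mpr hpre
        rw [if_pos htake, hdrop]
        simp only [PySem.Chars.replace.go, hpb, if_pos]
        rw [replace_go_acc]
        have hdd : (text[i] :: text.drop (i + 1)).drop target.length = text.drop (i + target.length) := by
          rw [← hdrop, List.drop_drop]
        rw [hdd]
        rw [ih (i + target.length) (result ++ replacement) fuelB (by omega)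
            (by rw [List.length_drop]; omega)]
        simp
      · have htake : ¬ (text.drop i).take target.length = target := by
          intro h; exact hpre (List.prefix_iff_eq_take.mpr h.symm)
        have hpb : target.isPrefixOf (text[i] :: text.drop (i + 1)) = false := by
          rw [← hdrop]
          exact Bool.eq_false_iff.mpr (fun h => hpre (List.isPrefixOf_iff_prefix.mp h))
        rw [if_neg htake, hdrop]
        simp only [PySem.Chars.replace.go, hpb, Bool.false_eq_true, if_false]
        rw [replace_go_acc]
        rw [ih (i + 1) (result ++ [text.getD i ' ']) fuelB (by omega)
            (by rw [List.length_drop]; omega)]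
        simp [List.getD, List.getElem?_eq_getElem hi]
    · have hdrop : text.drop i = [] := List.drop_eq_nil_of_le (by omega)
      cases fuelB <;>
        simp [custom_replace_go, hi, hdrop, PySem.Chars.replace.go]

-- ===== VERDICT (by name: the statement is the Claim_ definition above) =====
theorem custom_replace_spec : Claim_equal_custom_replace := by
  intro text target replacement _ hpre
  unfold Spec_custom_replace custom_replace custom_replace_alt
  have hne : target.toList ≠ [] := by
    intro h
    exact hpre (String.toList_inj.mp (by simp [h]))
  apply String.toList_inj.mp
  rw [PySem.Str.toList_replace, String.toList_ofList]
  unfold PySem.Chars.replace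
  rw [if_neg (by simp [List.isEmpty_iff, hne])]
  have := custom_replace_go_eq text.toList target.toList replacement.toList hne
    (text.toList.length + 1) 0 [] text.toList.length (by omega) (by simp)
  simp only [List.drop_zero] at this
  simpa using this
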